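-- pv_equiv track=rewrite | github.com/henzxu5-rgb/thesis-writing-assistant | plugins/thesis-writing-assistant/tools/plan-chunks.py | _split_at_level
-- ===== SOURCE A (Python) =====
-- def _split_at_level(group: list[dict], level: int) -> list[list[dict]]:
--     """将 section 列表按指定标题层级切分为子组。"""
--     sub_groups: list[list[dict]] = []
--     current: list[dict] = []
--     for sec in group:
--         if sec['level'] <= level and current:
--             sub_groups.append(current)
--             current = [sec]
--         else:
--             current.append(sec)
--     if current:
--         sub_groups.append(current)
--     return sub_groups
-- ===== SOURCE B (Python) =====
-- def _split_at_level(group: list[dict], level: int) -> list[list[dict]]: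
--     """Recursive span-based split: each call takes the head plus the longest
--     run of deeper sections as one sub-group, then recurses on the rest."""
--     if not group:
--         return []
--     rest = group[1:]
--     i = 0
--     while i < len(rest) and rest[i]['level'] > level:
--         i += 1
--     return [group[:i + 1]] + _split_at_level(rest[i:], level)
-- ===== Notes on version B (the rewrite author's own statement) =====
-- stated objective: alternative
-- what changed: Replaces A's accumulator loop (flush 'current' on each qualifying heading) with structural recursion: each call takes the head plus the longest run of deeper sections as one sub-group by slicing, then recurses on the remainder.
-- outside the precondition, e.g. on _split_at_level([{}], 1): A raises KeyError, B returns [[{}]]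
import Mathlib
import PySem

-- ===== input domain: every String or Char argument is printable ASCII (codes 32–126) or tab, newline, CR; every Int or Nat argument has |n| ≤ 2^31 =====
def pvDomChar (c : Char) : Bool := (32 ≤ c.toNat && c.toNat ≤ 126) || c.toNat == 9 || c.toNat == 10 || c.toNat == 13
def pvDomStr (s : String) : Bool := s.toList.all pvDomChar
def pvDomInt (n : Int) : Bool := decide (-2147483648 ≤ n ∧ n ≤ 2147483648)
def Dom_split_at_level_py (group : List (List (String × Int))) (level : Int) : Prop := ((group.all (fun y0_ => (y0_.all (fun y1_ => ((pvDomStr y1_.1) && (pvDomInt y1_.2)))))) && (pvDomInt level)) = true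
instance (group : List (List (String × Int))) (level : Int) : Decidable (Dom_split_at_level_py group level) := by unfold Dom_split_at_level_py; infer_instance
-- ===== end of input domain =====

-- B replaces A's running-accumulator loop by structural recursion: take head plus the
-- longest run of deeper sections as one sub-group, recurse on the rest (objective: alternative).
-- sec['level'] = first match in the association list; KeyError (missing key) is excluded
-- by Pre_, so the .getD 0 default is unreachable on admitted inputs.

-- ===== PORT A =====
-- sec['level'] (first-match lookup; Pre_ guarantees the key is present)
def pvLvl (sec : List (String × Int)) : Int := (sec.lookup "level").getD 0

def split_at_level_py (group : List (List (String × Int))) (level : Int) : List (List (List (String × Int))) :=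
  -- for sec in group: if sec['level'] <= level and current: flush; else append
  let st := group.foldl
    (fun (st : List (List (List (String × Int))) × List (List (String × Int))) sec =>
      if pvLvl sec ≤ level ∧ st.2 ≠ [] then (st.1 ++ [st.2], [sec])
      else (st.1, st.2 ++ [sec]))
    ([], [])
  if st.2 ≠ [] then st.1 ++ [st.2] else st.1

-- ===== PORT B =====
def split_at_level_py_alt (group : List (List (String × Int))) (level : Int) : List (List (List (String × Int))) :=
  match group with
  | [] => []
  | head :: rest =>
    -- i = length of the leading run with level > `level`; group[:i+1], rest[i:]
    let i := (rest.takeWhile (fun s => decide (pvLvl s > level))).length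
    (head :: rest.take i) :: split_at_level_py_alt (rest.drop i) level
termination_by group.length
decreasing_by
  simp only [List.length_drop, List.length_cons]
  omega

-- ===== PRECONDITION & SPEC =====
-- Pre_ excludes sections lacking a "level" key, on which Python A raises KeyError.
def Pre_split_at_level_py (group : List (List (String × Int))) (level : Int) : Prop :=
  ∀ sec ∈ group, (sec.lookup "level").isSome
instance (group : List (List (String × Int))) (level : Int) : Decidable (Pre_split_at_level_py group level) := by unfold Pre_split_at_level_py; infer_instance

def pvWitness_split_at_level_py : (List (List (String × Int))) × Int :=
  ([[("level", 1)], [("level", 2)], [("level", 1)]], 1)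

def Spec_split_at_level_py (group : List (List (String × Int))) (level : Int) (out : List (List (List (String × Int)))) : Prop := out = split_at_level_py_alt group level
instance (group : List (List (String × Int))) (level : Int) (out : List (List (List (String × Int)))) : Decidable (Spec_split_at_level_py group level out) := by unfold Spec_split_at_level_py; infer_instance

-- ===== CLAIM (what is proved, stated in full; the proofs are below) =====
def Claim_equal_split_at_level_py : Prop := ∀ (group : List (List (String × Int))) (level : Int), Dom_split_at_level_py group level → Pre_split_at_level_py group level → Spec_split_at_level_py group level (split_at_level_py group level)

-- ===== LEMMAS AND PROOFS =====

theorem take_takeWhile_length {α : Type} (p : α → Bool) (l : List α) :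
    l.take (l.takeWhile p).length = l.takeWhile p := by
  induction l with
  | nil => rfl
  | cons x xs ih =>
    by_cases h : p x <;> simp [List.takeWhile, h, ih]

theorem drop_takeWhile_length {α : Type} (p : α → Bool) (l : List α) :
    l.drop (l.takeWhile p).length = l.dropWhile p := by
  induction l with
  | nil => rfl
  | cons x xs ih =>
    by_cases h : p x <;> simp [List.takeWhile, List.dropWhile, h, ih]

-- unfolding B once on a nonempty list, rewritten via takeWhile/dropWhile
theorem alt_cons (head : List (String × Int)) (rest : List (List (String × Int))) (level : Int) :
    split_at_level_py_alt (head :: rest) level =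
      (head :: rest.takeWhile (fun s => decide (pvLvl s > level)))
        :: split_at_level_py_alt (rest.dropWhile (fun s => decide (pvLvl s > level))) level := by
  rw [split_at_level_py_alt]
  simp [take_takeWhile_length, drop_takeWhile_length]

-- A's loop invariant: running the fold with nonempty `current` produces the already
-- flushed groups, then the current group extended by the leading deep run, then B on the rest.
theorem foldA_invariant (level : Int) (l : List (List (String × Int)))
    (subs : List (List (List (String × Int)))) (cur : List (List (String × Int)))
    (hcur : cur ≠ []) :
    (let st := l.foldl
        (fun (st : List (List (List (String × Int))) × List (List (String × Int))) sec =>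
          if pvLvl sec ≤ level ∧ st.2 ≠ [] then (st.1 ++ [st.2], [sec])
          else (st.1, st.2 ++ [sec]))
        (subs, cur)
      if st.2 ≠ [] then st.1 ++ [st.2] else st.1) =
    subs ++ ((cur ++ l.takeWhile (fun s => decide (pvLvl s > level)))
        :: split_at_level_py_alt (l.dropWhile (fun s => decide (pvLvl s > level))) level) := by
  induction l generalizing subs cur with
  | nil => simp [hcur, split_at_level_py_alt]
  | cons y ys ih =>
    by_cases hy : pvLvl y ≤ level
    · have h1 : ¬ (pvLvl y > level) := by omega
      simp only [List.foldl_cons]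
      rw [if_pos (show pvLvl y ≤ level ∧ cur ≠ [] from ⟨hy, hcur⟩)]
      rw [ih (subs ++ [cur]) [y] (by simp)]
      simp [h1, alt_cons]
    · have h1 : pvLvl y > level := by omega
      simp only [List.foldl_cons]
      rw [if_neg (show ¬(pvLvl y ≤ level ∧ cur ≠ []) from fun h => hy h.1)]
      rw [ih subs (cur ++ [y]) (by simp)]
      simp [h1]

-- ===== VERDICT (by name: the statement is the Claim_ definition above) =====
theorem split_at_level_py_spec : Claim_equal_split_at_level_py := by
  intro group level _hdom _hpre
  unfold Spec_split_at_level_py split_at_level_py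
  cases group with
  | nil => simp [split_at_level_py_alt]
  | cons x xs =>
    simp only [List.foldl_cons]
    rw [show (if pvLvl x ≤ level ∧ ([] : List (List (String × Int))) ≠ [] then
          (([] : List (List (List (String × Int)))) ++ [[]], [x]) else ([], [] ++ [x]))
        = (([] : List (List (List (String × Int)))), [x]) by simp]
    rw [foldA_invariant level xs [] [x] (by simp)]
    rw [alt_cons]
    simp
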